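-- pv_equiv track=rewrite | github.com/Alirzeanoroozi/PRISM | benchmark/scripts/pre_scripts/prepare_db55_route1_prism_testfolder.py | write_with_ter_between_chains
-- ===== SOURCE A (Python) =====
-- from typing import Dict, List, Optional, Tuple
--
-- def get_chain_id(atom_line: str) -> str:
--     return atom_line[21] if len(atom_line) > 21 else " "
--
-- def write_with_ter_between_chains(atom_lines: List[str]) -> List[str]:
--     out: List[str] = []
--     prev = None
--     for ln in atom_lines:
--         c = get_chain_id(ln)
--         if prev is not None and c != prev:
--             out.append("TER")
--         out.append(ln)
--         prev = c
--     if out and out[-1] != "TER":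
--         out.append("TER")
--     return out
-- ===== SOURCE B (Python) =====
-- from typing import List
--
-- def get_chain_id(atom_line: str) -> str:
--     return atom_line[21] if len(atom_line) > 21 else " "
--
-- def write_with_ter_between_chains(atom_lines: List[str]) -> List[str]:
--     # Phase 1: split into maximal runs of consecutive lines with the same chain id.
--     groups: List[List[str]] = []
--     last_chain = None
--     for ln in atom_lines:
--         c = get_chain_id(ln)
--         if groups and c == last_chain:
--             groups[-1].append(ln)
--         else:
--             groups.append([ln])
--         last_chain = c
--     # Phase 2: join the runs with "TER" separators, then close with a trailing "TER".
--     out: List[str] = []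
--     for run in groups:
--         if out:
--             out.append("TER")
--         out.extend(run)
--     if out and out[-1] != "TER":
--         out.append("TER")
--     return out
-- ===== Notes on version B (the rewrite author's own statement) =====
-- stated objective: alternative
-- what changed: Replaces the prev-tracking streaming comparison with a two-phase runs-first structure: first split the lines into maximal consecutive same-chain runs, then join the runs with TER separators and close with a trailing TER.
import Mathlib
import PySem

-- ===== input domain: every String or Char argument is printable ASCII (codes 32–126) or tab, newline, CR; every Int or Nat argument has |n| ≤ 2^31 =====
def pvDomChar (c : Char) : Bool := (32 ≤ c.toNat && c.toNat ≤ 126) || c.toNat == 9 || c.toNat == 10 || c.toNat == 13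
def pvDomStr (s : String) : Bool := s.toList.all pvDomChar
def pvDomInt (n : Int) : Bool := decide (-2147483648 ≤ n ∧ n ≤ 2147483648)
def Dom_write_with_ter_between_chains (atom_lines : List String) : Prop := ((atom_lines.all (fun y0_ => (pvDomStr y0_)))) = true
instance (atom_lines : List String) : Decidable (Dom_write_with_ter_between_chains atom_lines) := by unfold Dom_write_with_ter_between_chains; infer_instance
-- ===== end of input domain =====

-- B replaces A's prev-tracking single pass by a two-phase structure (split into
-- consecutive same-chain runs, then join the runs with "TER" separators); alternative, not faster.

-- shared helper (both Pythons define the same get_chain_id)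
def get_chain_id (atom_line : String) : Char :=
  if 21 < PySem.Str.len atom_line then (PySem.Str.pyGet? atom_line 21).getD ' ' else ' '

-- ===== PORT A =====
-- A's loop step: state (out, prev); append "TER" on a chain change, then the line.
def aStep (st : List String × Option Char) (ln : String) : List String × Option Char :=
  let c := get_chain_id ln
  let out := match st.2 with
    | some p => if c ≠ p then st.1 ++ ["TER"] else st.1
    | none => st.1
  (out ++ [ln], some c)

def write_with_ter_between_chains (atom_lines : List String) : List String :=
  let st := atom_lines.foldl aStep ([], none)
  if st.1 ≠ [] ∧ st.1.getLast? ≠ some "TER" then st.1 ++ ["TER"] else st.1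

-- ===== PORT B =====
-- Phase 1 step: extend the last run if the chain id repeats, else start a new run.
def bStep (st : List (List String) × Option Char) (ln : String) : List (List String) × Option Char :=
  let c := get_chain_id ln
  let gs := match st.1.getLast? with
    | some last => if some c = st.2 then st.1.dropLast ++ [last ++ [ln]] else st.1 ++ [[ln]]
    | none => st.1 ++ [[ln]]
  (gs, some c)

-- Phase 2 step: separate consecutive runs with "TER".
def jStep (out : List String) (run : List String) : List String :=
  (if out ≠ [] then out ++ ["TER"] else out) ++ run

def write_with_ter_between_chains_alt (atom_lines : List String) : List String :=
  let groups := (atom_lines.foldl bStep ([], none)).1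
  let out := groups.foldl jStep []
  if out ≠ [] ∧ out.getLast? ≠ some "TER" then out ++ ["TER"] else out

-- ===== PRECONDITION & SPEC =====
def Spec_write_with_ter_between_chains (atom_lines : List String) (out : List String) : Prop := out = write_with_ter_between_chains_alt atom_lines
instance (atom_lines : List String) (out : List String) : Decidable (Spec_write_with_ter_between_chains atom_lines out) := by unfold Spec_write_with_ter_between_chains; infer_instance

-- ===== CLAIM (what is proved, stated in full; the proofs are below) =====
def Claim_equal_write_with_ter_between_chains : Prop := ∀ (atom_lines : List String), Dom_write_with_ter_between_chains atom_lines → Spec_write_with_ter_between_chains atom_lines (write_with_ter_between_chains atom_lines)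

-- ===== LEMMAS AND PROOFS =====

def joinG (gs : List (List String)) : List String := gs.foldl jStep []

theorem joinG_append_singleton (gs : List (List String)) (r : List String) :
    joinG (gs ++ [r]) = jStep (joinG gs) r := by
  simp [joinG, List.foldl_append]

-- invariant carried through the two folds
def BInv (gs : List (List String)) (lc : Option Char) : Prop :=
  (∀ r ∈ gs, r ≠ []) ∧ (gs = [] ↔ lc = none)

theorem main_inv (L : List String) :
    ∀ (gs : List (List String)) (lc : Option Char), BInv gs lc →
      L.foldl aStep (joinG gs, lc) =
        (joinG (L.foldl bStep (gs, lc)).1, (L.foldl bStep (gs, lc)).2)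
      ∧ BInv (L.foldl bStep (gs, lc)).1 (L.foldl bStep (gs, lc)).2 := by
  induction L with
  | nil => intro gs lc h; exact ⟨rfl, h⟩
  | cons ln L ih =>
    intro gs lc h
    obtain ⟨hruns, hiff⟩ := h
    simp only [List.foldl_cons]
    have hstep : aStep (joinG gs, lc) ln = (joinG (bStep (gs, lc) ln).1, (bStep (gs, lc) ln).2)
        ∧ BInv (bStep (gs, lc) ln).1 (bStep (gs, lc) ln).2 := by
      rcases lc with _ | p
      · -- prev is None: gs = []
        have hgs : gs = [] := hiff.mpr rfl
        subst hgs
        constructor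
        · simp [aStep, bStep, joinG, jStep]
        · constructor
          · intro r hr; simp [bStep] at hr; simp [hr]
          · simp [bStep]
      · -- prev = some p: gs nonempty
        have hgs : gs ≠ [] := by
          intro hnil; exact (by simp : (some p : Option Char) ≠ none) (hiff.mp hnil)
        obtain ⟨pre, last, rfl⟩ : ∃ pre last, gs = pre ++ [last] :=
          ⟨gs.dropLast, gs.getLast hgs, (List.dropLast_append_getLast hgs).symm⟩
        have hlq : (pre ++ [last]).getLast? = some last := by simp
        have hdrop : (pre ++ [last]).dropLast = pre := by simp
        set c := get_chain_id ln with hc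
        by_cases hcp : c = p
        · -- same chain: extend the last run / A appends just the line
          have hbs : bStep (pre ++ [last], some p) ln = (pre ++ [last ++ [ln]], some c) := by
            simp [bStep, ← hc, hcp]
          constructor
          · rw [hbs]
            simp only [aStep, ← hc, hcp]
            simp only [joinG_append_singleton]
            simp [jStep, List.append_assoc]
          · rw [hbs]
            refine ⟨?_, by simp⟩
            intro r hr
            rcases List.mem_append.mp hr with h1 | h1
            · exact hruns r (List.mem_append.mpr (Or.inl h1))
            · simp at h1; simp [h1]
        · -- chain change: new run / A appends "TER" then the line
          have hbs : bStep (pre ++ [last], some p) ln = ((pre ++ [last]) ++ [[ln]], some c) := by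
            simp [bStep, ← hc, hcp]
          have hl : last ≠ [] := hruns last (by simp)
          constructor
          · rw [hbs]
            simp only [joinG_append_singleton]
            simp [aStep, ← hc, hcp, jStep, hl]
          · rw [hbs]
            refine ⟨?_, by simp⟩
            intro r hr
            rcases List.mem_append.mp hr with h1 | h1
            · exact hruns r h1
            · simp at h1; simp [h1]
    rw [hstep.1]
    exact ih _ _ hstep.2

-- ===== VERDICT (by name: the statement is the Claim_ definition above) =====
theorem write_with_ter_between_chains_spec : Claim_equal_write_with_ter_between_chains := by
  intro atom_lines _
  unfold Spec_write_with_ter_between_chains write_with_ter_between_chains write_with_ter_between_chains_alt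
  have h := main_inv atom_lines [] none ⟨by simp, by simp⟩
  have h0 : joinG ([] : List (List String)) = [] := rfl
  rw [h0] at h
  have := h.1
  rcases hb : atom_lines.foldl bStep ([], none) with ⟨gs, lc⟩
  rw [hb] at this
  simp only [this, joinG]
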